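-- pv_equiv track=rewrite | github.com/usnistgov/EPA_Legionella | scripts/process_quantaq_data.py | reorder_pm_columns
-- ===== SOURCE A (Python) =====
-- from typing import List, Tuple
--
-- def reorder_pm_columns(columns: List[str], prefix: str) -> Tuple[List[str], List[str]]:
--     """
--     Reorder pm columns within a list to be pm1, pm2.5, pm10.
--     Also renames pm25 to pm2.5.
--
--     Args:
--         columns: List of column names.
--         prefix: The prefix for pm columns (e.g., 'neph', 'opc', 'final').
--
--     Returns:
--         Tuple of (non-pm columns, reordered pm column names).
--     """
--     pm1_col = f"{prefix}_pm1"
--     pm25_col = f"{prefix}_pm25"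
--     pm25_new = f"{prefix}_pm2.5"
--     pm10_col = f"{prefix}_pm10"
--
--     result = []
--     pm_cols_found = []
--
--     for col in columns:
--         if col == pm25_col:
--             pm_cols_found.append((1, pm25_new))  # Will be renamed and placed second
--         elif col == pm1_col:
--             pm_cols_found.append((0, pm1_col))  # First
--         elif col == pm10_col:
--             pm_cols_found.append((2, pm10_col))  # Third
--         else:
--             result.append(col)
--
--     # Sort pm columns by order and insert them
--     pm_cols_found.sort(key=lambda x: x[0])
--     pm_ordered = [col for _, col in pm_cols_found]
--
--     return result, pm_ordered
-- ===== SOURCE B (Python) =====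
-- def reorder_pm_columns(columns, prefix):
--     pm1_col = f"{prefix}_pm1"
--     pm25_col = f"{prefix}_pm25"
--     pm10_col = f"{prefix}_pm10"
--     pm_names = {pm1_col, pm25_col, pm10_col}
--     result = [c for c in columns if c not in pm_names]
--     pm_ordered = []
--     for name, out in ((pm1_col, pm1_col), (pm25_col, f"{prefix}_pm2.5"), (pm10_col, pm10_col)):
--         pm_ordered.extend([out] * columns.count(name))
--     return result, pm_ordered
-- ===== Notes on version B (the rewrite author's own statement) =====
-- stated objective: simpler
-- what changed: B builds the non-pm list with a single filter and derives the pm block directly from the fixed target order using per-name occurrence counts (extend with [name]*count), instead of tagging each pm column with a rank and stable-sorting the tagged list.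
import Mathlib
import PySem

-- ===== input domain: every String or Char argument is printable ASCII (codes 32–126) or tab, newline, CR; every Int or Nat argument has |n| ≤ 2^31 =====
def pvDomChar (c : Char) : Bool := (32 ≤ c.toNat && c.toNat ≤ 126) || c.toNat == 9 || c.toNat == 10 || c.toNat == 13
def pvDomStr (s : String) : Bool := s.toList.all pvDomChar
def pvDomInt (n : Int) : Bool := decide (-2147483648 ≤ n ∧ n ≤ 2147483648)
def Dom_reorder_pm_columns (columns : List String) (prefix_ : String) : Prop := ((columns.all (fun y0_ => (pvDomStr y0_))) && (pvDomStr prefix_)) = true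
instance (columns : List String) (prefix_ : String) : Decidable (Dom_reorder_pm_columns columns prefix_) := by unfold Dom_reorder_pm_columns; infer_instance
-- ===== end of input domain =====

-- B re-derives the pm block from the fixed target order via per-name counts (filter + count/extend)
-- instead of classifying each column with a tag and stable-sorting; objective: simpler. A=B proved on all inputs.

-- ===== PORT A =====
-- the body of A's for-loop (state = (result, pm_cols_found))
def pvStepA (pm1_col pm25_col pm25_new pm10_col : String)
    (s : List String × List (Int × String)) (col : String) : List String × List (Int × String) :=
  if col == pm25_col then (s.1, s.2 ++ [(1, pm25_new)])
  else if col == pm1_col then (s.1, s.2 ++ [(0, pm1_col)])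
  else if col == pm10_col then (s.1, s.2 ++ [(2, pm10_col)])
  else (s.1 ++ [col], s.2)

def reorder_pm_columns (columns : List String) (prefix_ : String) : List String × List String :=
  let pm1_col := prefix_ ++ "_pm1"
  let pm25_col := prefix_ ++ "_pm25"
  let pm25_new := prefix_ ++ "_pm2.5"
  let pm10_col := prefix_ ++ "_pm10"
  let st := columns.foldl (pvStepA pm1_col pm25_col pm25_new pm10_col) ([], [])
  -- pm_cols_found.sort(key=lambda x: x[0]); pm_ordered = [col for _, col in pm_cols_found]
  let pm_sorted := PySem.List.sorted st.2 (fun x => x.1)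
  (st.1, pm_sorted.map (fun x => x.2))

-- ===== PORT B =====
def reorder_pm_columns_alt (columns : List String) (prefix_ : String) : List String × List String :=
  let pm1_col := prefix_ ++ "_pm1"
  let pm25_col := prefix_ ++ "_pm25"
  let pm10_col := prefix_ ++ "_pm10"
  let pm_names : PySem.Set String := PySem.Set.ofList [pm1_col, pm25_col, pm10_col]
  let result := columns.filter (fun col => !(PySem.Set.contains pm_names col))
  let pm_ordered :=
    [(pm1_col, pm1_col), (pm25_col, prefix_ ++ "_pm2.5"), (pm10_col, pm10_col)].foldl
      (fun acc p => acc ++ PySem.List.pyRepeat [p.2] ((PySem.List.count columns p.1 : Int))) []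
  (result, pm_ordered)

-- ===== PRECONDITION & SPEC =====
def Spec_reorder_pm_columns (columns : List String) (prefix_ : String) (out : List String × List String) : Prop := out = reorder_pm_columns_alt columns prefix_
instance (columns : List String) (prefix_ : String) (out : List String × List String) : Decidable (Spec_reorder_pm_columns columns prefix_ out) := by unfold Spec_reorder_pm_columns; infer_instance

-- ===== CLAIM (what is proved, stated in full; the proofs are below) =====
def Claim_equal_reorder_pm_columns : Prop := ∀ (columns : List String) (prefix_ : String), Dom_reorder_pm_columns columns prefix_ → Spec_reorder_pm_columns columns prefix_ (reorder_pm_columns columns prefix_)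

-- ===== LEMMAS AND PROOFS =====

-- inserting x in front of a list every element of which compares after x
theorem pv_insertBy_of_forall_before {α : Type} (before : α → α → Bool) (x : α) (ys : List α)
    (h : ∀ y ∈ ys, before x y = true) :
    PySem.List.insertBy before x ys = x :: ys := by
  cases ys with
  | nil => rfl
  | cons y ys => simp [PySem.List.insertBy, h y (by simp)]

-- inserting x skips a prefix no element of which compares after x
theorem pv_insertBy_append {α : Type} (before : α → α → Bool) (x : α) (as bs : List α)
    (h : ∀ y ∈ as, before x y = false) :
    PySem.List.insertBy before x (as ++ bs) = as ++ PySem.List.insertBy before x bs := by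
  induction as with
  | nil => rfl
  | cons a as ih =>
    simp only [List.cons_append, PySem.List.insertBy, h a (by simp)]
    simp only [Bool.false_eq_true, if_false, List.cons.injEq, true_and]
    exact ih (fun y hy => h y (by simp [hy]))

-- the loop of A, characterised: the non-pm part is a filter, and the stable sort of the
-- tagged pm list is the three replicate blocks in the fixed order (a = pm1, b = pm25, c = pm10, d = pm2.5)
theorem pvMain (a b c d : String) (hba : b ≠ a) (hca : c ≠ a) (hcb : c ≠ b) (cols : List String) :
    (cols.foldl (pvStepA a b d c) ([], [])).1
      = cols.filter (fun col => !(col == a || col == b || col == c)) ∧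
    PySem.List.sorted (cols.foldl (pvStepA a b d c) ([], [])).2 (fun x => x.1)
      = List.replicate (cols.count a) ((0:Int), a)
        ++ List.replicate (cols.count b) ((1:Int), d)
        ++ List.replicate (cols.count c) ((2:Int), c) := by
  have hab : a ≠ b := fun h => hba h.symm
  have hac : a ≠ c := fun h => hca h.symm
  have hbc : b ≠ c := fun h => hcb h.symm
  induction cols using List.reverseRecOn with
  | nil => exact ⟨rfl, rfl⟩
  | append_singleton cols x ih =>
    obtain ⟨ih1, ih2⟩ := ih
    rw [List.foldl_append, List.foldl_cons, List.foldl_nil]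
    have hsort : ∀ e : Int × String,
        PySem.List.sorted ((cols.foldl (pvStepA a b d c) ([], [])).2 ++ [e]) (fun x => x.1)
          = PySem.List.insertBy (fun p q => decide (p.1 < q.1)) e
              (PySem.List.sorted (cols.foldl (pvStepA a b d c) ([], [])).2 (fun x => x.1)) := by
      intro e
      rw [PySem.List.sorted_eq_foldl_insertBy, PySem.List.sorted_eq_foldl_insertBy,
        List.foldl_append, List.foldl_cons, List.foldl_nil]
    by_cases hxb : x = b
    · have hstep : pvStepA a b d c (cols.foldl (pvStepA a b d c) ([], [])) x
          = ((cols.foldl (pvStepA a b d c) ([], [])).1,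
             (cols.foldl (pvStepA a b d c) ([], [])).2 ++ [(1, d)]) := by
        simp [pvStepA, hxb]
      rw [hstep]
      refine ⟨?_, ?_⟩
      · simp [List.filter_append, ih1, hxb]
      · have hskip : ∀ y ∈ (List.replicate (cols.count a) ((0:Int),a)
            ++ List.replicate (cols.count b) ((1:Int),d)),
            (fun (p q : Int × String) => decide (p.1 < q.1)) ((1:Int),d) y = false := by
          intro y hy
          rcases List.mem_append.1 hy with hy | hy <;> simp [List.eq_of_mem_replicate hy]
        have htail : ∀ y ∈ List.replicate (cols.count c) ((2:Int),c),
            (fun (p q : Int × String) => decide (p.1 < q.1)) ((1:Int),d) y = true := by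
          intro y hy; simp [List.eq_of_mem_replicate hy]
        rw [hsort, ih2, pv_insertBy_append _ _ _ _ hskip,
          pv_insertBy_of_forall_before _ _ _ htail]
        simp [List.count_append, List.count_cons, List.count_nil, beq_iff_eq, hxb,
          hba, hca, hcb, hab, hac, hbc, List.replicate_succ']
    · by_cases hxa : x = a
      · have hstep : pvStepA a b d c (cols.foldl (pvStepA a b d c) ([], [])) x
            = ((cols.foldl (pvStepA a b d c) ([], [])).1,
               (cols.foldl (pvStepA a b d c) ([], [])).2 ++ [(0, a)]) := by
          simp [pvStepA, hxb, hxa, hab]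
        rw [hstep]
        refine ⟨?_, ?_⟩
        · simp [List.filter_append, ih1, hxa]
        · have hskip : ∀ y ∈ List.replicate (cols.count a) ((0:Int),a),
              (fun (p q : Int × String) => decide (p.1 < q.1)) ((0:Int),a) y = false := by
            intro y hy; simp [List.eq_of_mem_replicate hy]
          have htail : ∀ y ∈ (List.replicate (cols.count b) ((1:Int),d)
              ++ List.replicate (cols.count c) ((2:Int),c)),
              (fun (p q : Int × String) => decide (p.1 < q.1)) ((0:Int),a) y = true := by
            intro y hy
            rcases List.mem_append.1 hy with hy | hy <;> simp [List.eq_of_mem_replicate hy]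
          rw [hsort, ih2, List.append_assoc, pv_insertBy_append _ _ _ _ hskip,
            pv_insertBy_of_forall_before _ _ _ htail]
          simp [List.count_append, List.count_cons, List.count_nil, beq_iff_eq, hxa,
            hba, hca, hcb, hab, hac, hbc, List.replicate_succ']
      · by_cases hxc : x = c
        · have hstep : pvStepA a b d c (cols.foldl (pvStepA a b d c) ([], [])) x
              = ((cols.foldl (pvStepA a b d c) ([], [])).1,
                 (cols.foldl (pvStepA a b d c) ([], [])).2 ++ [(2, c)]) := by
            simp [pvStepA, hxb, hxa, hxc, hca, hcb]
          rw [hstep]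
          refine ⟨?_, ?_⟩
          · simp [List.filter_append, ih1, hxc]
          · have hall : ∀ y ∈ (List.replicate (cols.count a) ((0:Int),a)
                ++ List.replicate (cols.count b) ((1:Int),d)
                ++ List.replicate (cols.count c) ((2:Int),c)),
                (fun (p q : Int × String) => decide (p.1 < q.1)) ((2:Int),c) y = false := by
              intro y hy
              rcases List.mem_append.1 hy with hy | hy
              · rcases List.mem_append.1 hy with hy | hy <;> simp [List.eq_of_mem_replicate hy]
              · simp [List.eq_of_mem_replicate hy]
            rw [hsort, ih2, PySem.List.insertBy_of_forall_not_before _ _ _ hall]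
            simp [List.count_append, List.count_cons, List.count_nil, beq_iff_eq, hxc,
              hba, hca, hcb, hab, hac, hbc, List.replicate_succ']
        · have hstep : pvStepA a b d c (cols.foldl (pvStepA a b d c) ([], [])) x
              = ((cols.foldl (pvStepA a b d c) ([], [])).1 ++ [x],
                 (cols.foldl (pvStepA a b d c) ([], [])).2) := by
            simp [pvStepA, hxb, hxa, hxc, hca, hcb]
          rw [hstep]
          refine ⟨?_, ?_⟩
          · simp [List.filter_append, ih1, hxa, hxb, hxc]
          · rw [ih2]
            simp [List.count_append, List.count_cons, List.count_nil, beq_iff_eq, hxa, hxb, hxc]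

-- the three pm column names are pairwise distinct for every prefix
theorem pv_names_ne (p : String) (s t : String) (hst : s.toList ≠ t.toList) :
    p ++ s ≠ p ++ t := by
  intro h
  have h2 := congrArg String.toList h
  rw [String.toList_append, String.toList_append] at h2
  exact hst (List.append_cancel_left h2)

-- ===== VERDICT (by name: the statement is the Claim_ definition above) =====
theorem reorder_pm_columns_spec : Claim_equal_reorder_pm_columns := by
  intro columns prefix_ _
  unfold Spec_reorder_pm_columns reorder_pm_columns reorder_pm_columns_alt
  have hba : prefix_ ++ "_pm25" ≠ prefix_ ++ "_pm1" := pv_names_ne _ _ _ (by decide)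
  have hca : prefix_ ++ "_pm10" ≠ prefix_ ++ "_pm1" := pv_names_ne _ _ _ (by decide)
  have hcb : prefix_ ++ "_pm10" ≠ prefix_ ++ "_pm25" := pv_names_ne _ _ _ (by decide)
  obtain ⟨h1, h2⟩ := pvMain (prefix_ ++ "_pm1") (prefix_ ++ "_pm25") (prefix_ ++ "_pm10")
    (prefix_ ++ "_pm2.5") hba hca hcb columns
  refine Prod.ext ?_ ?_
  · show (columns.foldl _ ([], [])).1 = _
    rw [h1]
    apply List.filter_congr
    intro col _
    by_cases e1 : col = prefix_ ++ "_pm1" <;> by_cases e2 : col = prefix_ ++ "_pm25" <;>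
      by_cases e3 : col = prefix_ ++ "_pm10" <;>
      simp [PySem.Set.contains, e1, e2, e3, Bool.and_assoc]
  · show (PySem.List.sorted _ _).map _ = _
    rw [h2]
    simp [PySem.List.pyRepeat_singleton, PySem.List.count_eq,
      List.map_append, List.map_replicate, List.foldl_cons, List.foldl_nil]
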